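-- pv_equiv track=rewrite | github.com/djvanhelmond/AdventofCode2017 | --- Day 21: Fractal Art ---/--- Day 21: Fractal Art ---.py | __recombineSquares
-- ===== SOURCE A (Python) =====
-- import math
--
-- def __recombineSquares(squares, size):
--     artSize = int(math.sqrt(len(squares)))
--     squares = [ square.split("/") for square in squares ]
--     newArt = []
--     for h in range(1):
--         for i in range(0, artSize):
--             for j in range(size+1):
--                 line = []
--                 for k in range(artSize):
--                     line.append(squares[(i*artSize)+k][j])
--                 newArt.append("".join(line))
--     return newArt
-- ===== SOURCE B (Python) =====
-- import math
--
-- def __recombineSquares(squares, size):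
--     art = int(math.sqrt(len(squares)))
--     height = size + 1
--     rows = ["" for _ in range(art * height)]
--     for idx in range(art * art):
--         lines = squares[idx].split("/")
--         base = (idx // art) * height
--         for j in range(height):
--             rows[base + j] += lines[j]
--     return rows
-- ===== Notes on version B (the rewrite author's own statement) =====
-- stated objective: alternative
-- what changed: Replaces A's gather strategy (build each output line by indexing the j-th line of each square across a block-row) with a scatter strategy: preallocate all art*(size+1) output rows as empty strings and make one pass over the squares, appending each square's lines into the row slots of its block-row.
import Mathlib
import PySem

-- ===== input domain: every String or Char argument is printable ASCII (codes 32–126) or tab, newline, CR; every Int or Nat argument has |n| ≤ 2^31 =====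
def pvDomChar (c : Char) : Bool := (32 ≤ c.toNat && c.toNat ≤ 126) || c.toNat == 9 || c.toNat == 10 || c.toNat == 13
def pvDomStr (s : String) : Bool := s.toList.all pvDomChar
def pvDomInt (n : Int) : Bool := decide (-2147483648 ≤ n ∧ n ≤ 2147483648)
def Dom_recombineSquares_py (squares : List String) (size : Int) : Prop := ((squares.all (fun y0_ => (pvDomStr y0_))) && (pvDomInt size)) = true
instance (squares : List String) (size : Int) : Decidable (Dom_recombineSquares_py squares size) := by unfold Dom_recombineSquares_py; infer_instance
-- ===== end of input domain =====

-- B replaces A's per-output-line gather (triple index loops) with a single scatter pass that preallocates the output rows and appends each square's lines into its block-row slots; same cost, different algorithm.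


-- ===== PORT A =====
-- int(math.sqrt(n)) for a list length: the largest k ≤ n with k*k ≤ n, computed by a
-- kernel-reducible scan (exact for the machine-int list lengths the domain admits)
def pvIsqrt (n : Nat) : Nat :=
  (List.range (n+1)).foldl (fun acc k => if k*k ≤ n then k else acc) 0

-- s.split("/"): the separator "/" is nonempty, so PySem.Str.split? never returns none
def pvSplit (s : String) : List String := (PySem.Str.split? s "/").getD []

def recombineSquares_py (squares : List String) (size : Int) : List String :=
  let artSize : Int := (pvIsqrt squares.length : Int)
  let sq : List (List String) := squares.map (fun s => pvSplit s)
  (PySem.List.pyRange 0 1 1).foldl (fun newArt _h =>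
    (PySem.List.pyRange 0 artSize 1).foldl (fun newArt i =>
      (PySem.List.pyRange 0 (size+1) 1).foldl (fun newArt j =>
        let line : List String := (PySem.List.pyRange 0 artSize 1).foldl (fun line k =>
          line ++ [PySem.List.pyGetD (PySem.List.pyGetD sq (i*artSize+k) []) j ""]) []
        newArt ++ [PySem.Str.join "" line]) newArt) newArt) []

-- ===== PORT B =====
-- the in-place update rows[base+j] += lines[j] is ported as functional pySetD/pyGetD;
-- under Pre_ every index this loop produces is nonnegative and in range, where both are exact
def recombineSquares_py_alt (squares : List String) (size : Int) : List String :=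
  let art : Nat := pvIsqrt squares.length
  let height : Int := size + 1
  let rows : List String := (PySem.List.pyRange 0 ((art : Int) * height) 1).map (fun _ => "")
  (PySem.List.pyRange 0 ((art : Int) * (art : Int)) 1).foldl (fun rows idx =>
    let lines := pvSplit (PySem.List.pyGetD squares idx "")
    let base : Int := (PySem.Int.floordiv idx (art : Int)) * height
    (PySem.List.pyRange 0 height 1).foldl (fun rows j =>
      PySem.List.pySetD rows (base + j)
        (PySem.List.pyGetD rows (base + j) "" ++ PySem.List.pyGetD lines j "")) rows) rows

-- ===== PRECONDITION & SPEC =====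
-- Pre_ is exactly A's non-raising set: every square A indexes into (the first artSize²
-- of them) must split on '/' into at least size+1 lines, else A raises IndexError.
def Pre_recombineSquares_py (squares : List String) (size : Int) : Prop :=
  ∀ s ∈ squares.take (pvIsqrt squares.length * pvIsqrt squares.length),
    size + 1 ≤ ((pvSplit s).length : Int)
instance (squares : List String) (size : Int) : Decidable (Pre_recombineSquares_py squares size) := by unfold Pre_recombineSquares_py; infer_instance
def pvWitness_recombineSquares_py : List String × Int := (["ab/cd", "ef/gh", "ij/kl", "mn/op"], 1)
def Spec_recombineSquares_py (squares : List String) (size : Int) (out : List String) : Prop := out = recombineSquares_py_alt squares size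
instance (squares : List String) (size : Int) (out : List String) : Decidable (Spec_recombineSquares_py squares size out) := by unfold Spec_recombineSquares_py; infer_instance

-- ===== CLAIM (what is proved, stated in full; the proofs are below) =====
def Claim_equal_recombineSquares_py : Prop := ∀ (squares : List String) (size : Int), Dom_recombineSquares_py squares size → Pre_recombineSquares_py squares size → Spec_recombineSquares_py squares size (recombineSquares_py squares size)

-- ===== LEMMAS AND PROOFS =====

-- the common canonical form both ports are reduced to
def pvCanon (squares : List String) (size : Int) : List String :=
  let art : Nat := pvIsqrt squares.length
  let sq : List (List String) := squares.map (fun s => pvSplit s)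
  (List.range art).flatMap (fun r =>
    (List.range (size+1).toNat).map (fun j =>
      PySem.Str.join "" ((List.range art).map (fun k => (sq.getD (r*art+k) []).getD j ""))))


theorem pvA_eq_canon (squares : List String) (size : Int) :
    recombineSquares_py squares size = pvCanon squares size := by
  unfold recombineSquares_py pvCanon
  show (PySem.List.pyRange 0 1 1).foldl _ [] = _
  rw [show PySem.List.pyRange 0 1 1 = [0] from rfl]
  simp only [List.foldl_cons, List.foldl_nil]
  set N := pvIsqrt squares.length with hN
  set sq := squares.map (fun s => pvSplit s) with hsq
  rw [PySem.List.pyRange_one 0 ((N : Nat) : Int)]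
  simp only [Int.sub_zero, Int.toNat_natCast, List.foldl_map, zero_add]
  have hline : ∀ (r j : Nat),
      (List.range N).foldl
        (fun line (k : Nat) => line ++ [PySem.List.pyGetD (PySem.List.pyGetD sq ((r:Int)*(N:Int)+(k:Int)) []) ((j:Nat):Int) ""]) []
      = (List.range N).map (fun k => (sq.getD (r*N+k) []).getD j "") := by
    intro r j
    rw [PySem.List.foldl_append_singleton_eq_map]
    apply List.map_congr_left
    intro k _
    have hcast : (r:Int)*(N:Int)+(k:Int) = ((r*N+k : Nat) : Int) := by push_cast; ring
    rw [hcast, PySem.List.pyGetD_natCast, PySem.List.pyGetD_natCast]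
  have hrow : ∀ (r : Nat) (acc : List String),
      (PySem.List.pyRange 0 (size+1) 1).foldl (fun newArt j =>
        newArt ++ [PySem.Str.join "" ((List.range N).foldl
          (fun line (k : Nat) => line ++ [PySem.List.pyGetD (PySem.List.pyGetD sq ((r:Int)*(N:Int)+(k:Int)) []) j ""]) [])]) acc
      = acc ++ (List.range (size+1).toNat).map (fun j =>
          PySem.Str.join "" ((List.range N).map (fun k => (sq.getD (r*N+k) []).getD j ""))) := by
    intro r acc
    rw [PySem.List.foldl_append_singleton_eq_map]
    congr 1
    rw [PySem.List.pyRange_one 0 (size+1), List.map_map]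
    simp only [Int.sub_zero, Function.comp_def, zero_add]
    apply List.map_congr_left
    intro j _
    rw [hline r j]
  rw [PySem.List.foldl_congr_mem _ _
    (fun acc r => acc ++ (List.range (size+1).toNat).map (fun j =>
      PySem.Str.join "" ((List.range N).map (fun k => (sq.getD (r*N+k) []).getD j ""))))
    _ (fun acc r _ => hrow r acc)]
  rw [PySem.List.foldl_append_eq_flatMap, List.nil_append]

theorem pvIsqrt_sq_le (n : Nat) : pvIsqrt n * pvIsqrt n ≤ n := by
  unfold pvIsqrt
  have : ∀ (l : List Nat) (a : Nat), a * a ≤ n →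
      (l.foldl (fun acc k => if k*k ≤ n then k else acc) a) *
        (l.foldl (fun acc k => if k*k ≤ n then k else acc) a) ≤ n := by
    intro l
    induction l with
    | nil => intro a ha; exact ha
    | cons x t ih =>
      intro a ha
      simp only [List.foldl_cons]
      by_cases hx : x*x ≤ n
      · simp only [hx, if_true]; exact ih x hx
      · simp only [hx, if_false]; exact ih a ha
  exact this _ 0 (by omega)

theorem pvChars_join_append : ∀ (ls : List (List Char)) (y : List Char),
    PySem.Chars.join [] (ls ++ [y]) = PySem.Chars.join [] ls ++ y := by
  intro ls
  induction ls with
  | nil => intro y; simp [PySem.Chars.join_singleton, PySem.Chars.join_nil]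
  | cons x t ih =>
    intro y
    cases t with
    | nil => simp [PySem.Chars.join_singleton, PySem.Chars.join_cons_cons]
    | cons b bs =>
      have ih' := ih y
      simp only [List.cons_append] at ih' ⊢
      rw [PySem.Chars.join_cons_cons, PySem.Chars.join_cons_cons, ih']
      simp

theorem pvJoin_append (l : List String) (y : String) :
    PySem.Str.join "" (l ++ [y]) = PySem.Str.join "" l ++ y := by
  rw [← String.toList_inj]
  simp [PySem.Str.toList_join, pvChars_join_append]

theorem pvGetD_map_range (g : Nat → String) (n q : Nat) (hq : q < n) :
    ((List.range n).map g).getD q "" = g q := by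
  rw [List.getD_eq_getElem _ _ (by simpa using hq)]
  simp

theorem pvSet_map_range (g : Nat → String) (n q : Nat) (v : String) :
    ((List.range n).map g).set q v
      = (List.range n).map (fun p => if p = q then v else g p) := by
  apply List.ext_getElem
  · simp
  · intro i h1 h2
    simp only [List.getElem_set, List.getElem_map, List.getElem_range]
    by_cases h : q = i <;> simp [h]
    · omega

theorem pvInnerFold (c : Nat) : ∀ (base n : Nat) (g f : Nat → String), base + c ≤ n →
    (List.range c).foldl (fun rows j =>
        rows.set (base + j) (rows.getD (base + j) "" ++ f j)) ((List.range n).map g)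
      = (List.range n).map (fun p =>
          if base ≤ p ∧ p < base + c then g p ++ f (p - base) else g p) := by
  induction c with
  | zero =>
    intro base n g f _
    simp only [List.range_zero, List.foldl_nil]
    apply List.map_congr_left
    intro p _
    simp
  | succ c ih =>
    intro base n g f h
    rw [List.range_succ, List.foldl_append, List.foldl_cons, List.foldl_nil,
        ih base n g f (by omega)]
    rw [pvGetD_map_range _ n (base + c) (by omega)]
    have hno : ¬ (base ≤ base + c ∧ base + c < base + c) := by omega
    rw [if_neg hno, pvSet_map_range]
    apply List.map_congr_left
    intro p hp
    by_cases h1 : p = base + c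
    · subst h1
      rw [if_pos rfl, if_pos (by omega)]
      congr 2
      omega
    · rw [if_neg h1]
      by_cases h2 : base ≤ p ∧ p < base + c
      · rw [if_pos h2, if_pos (by omega)]
      · rw [if_neg h2, if_neg (by omega)]

def pvLine (squares : List String) (idx j : Nat) : String :=
  ((squares.map (fun s => pvSplit s)).getD idx []).getD j ""

def pvG (squares : List String) (N m t p : Nat) : String :=
  PySem.Str.join "" ((List.range (min N (t - (p / m) * N))).map
    (fun k => pvLine squares ((p / m) * N + k) (p % m)))

def pvStep (squares : List String) (N m : Nat) (rows : List String) (t : Nat) : List String :=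
  (List.range m).foldl (fun rows j =>
    rows.set ((t / N) * m + j)
      (rows.getD ((t / N) * m + j) "" ++ pvLine squares t j)) rows

theorem pvG_zero (squares : List String) (N m p : Nat) : pvG squares N m 0 p = "" := by
  unfold pvG
  have h : min N (0 - (p / m) * N) = 0 := by omega
  rw [h]
  rfl

theorem pvScatter (squares : List String) (N m : Nat) :
    ∀ t, t ≤ N * N →
      (List.range t).foldl (pvStep squares N m) ((List.range (N * m)).map (fun _ => ""))
        = (List.range (N * m)).map (pvG squares N m t) := by
  intro t
  induction t with
  | zero =>
    intro _
    simp only [List.range_zero, List.foldl_nil]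
    apply List.map_congr_left
    intro p _
    exact (pvG_zero squares N m p).symm
  | succ t ih =>
    intro ht
    have hN : 0 < N := by
      by_contra h
      have hz : N = 0 := by omega
      rw [hz, Nat.mul_zero] at ht
      omega
    have htN : t / N < N := Nat.div_lt_of_lt_mul (by omega)
    have hdn := Nat.div_add_mod t N
    have hc1 : N * (t / N) = (t / N) * N := Nat.mul_comm _ _
    have hmodn : t % N < N := Nat.mod_lt _ hN
    rw [List.range_succ, List.foldl_append, List.foldl_cons, List.foldl_nil, ih (by omega)]
    unfold pvStep
    rw [pvInnerFold m ((t / N) * m) (N * m) _ _ (by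
      have h3 : (t / N + 1) * m ≤ N * m := Nat.mul_le_mul_right m (by omega)
      calc (t/N) * m + m = (t/N + 1) * m := by ring
        _ ≤ N * m := h3)]
    apply List.map_congr_left
    intro p hp
    have hpm : p < N * m := List.mem_range.1 hp
    have hm : 0 < m := by
      by_contra h
      have hz : m = 0 := by omega
      rw [hz, Nat.mul_zero] at hpm
      omega
    have hdm := Nat.div_add_mod p m
    have hc2 : m * (p / m) = (p / m) * m := Nat.mul_comm _ _
    have hmodm : p % m < m := Nat.mod_lt _ hm
    by_cases hc : (t / N) * m ≤ p ∧ p < (t / N) * m + m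
    · have hr : p / m = t / N := by
        by_contra hne
        rcases Nat.lt_or_ge (p / m) (t / N) with hlt | hge
        · have h3 : (p/m) * m + m ≤ (t/N) * m := by
            have h4 : (p/m + 1) * m ≤ (t/N) * m := Nat.mul_le_mul_right m (by omega)
            calc (p/m) * m + m = (p/m + 1) * m := by ring
              _ ≤ (t/N) * m := h4
          omega
        · have hgt : t / N < p / m := by omega
          have h3 : (t/N) * m + m ≤ (p/m) * m := by
            have h4 : (t/N + 1) * m ≤ (p/m) * m := Nat.mul_le_mul_right m (by omega)
            calc (t/N) * m + m = (t/N + 1) * m := by ring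
              _ ≤ (p/m) * m := h4
          omega
      rw [if_pos hc]
      unfold pvG
      rw [hr]
      have hr' : (p / m) * m = (t / N) * m := by rw [hr]
      have h1 : min N (t - (t / N) * N) = t % N := by omega
      have h2 : min N (t + 1 - (t / N) * N) = t % N + 1 := by omega
      rw [h1, h2, List.range_succ, List.map_append, List.map_cons, List.map_nil,
          pvJoin_append]
      congr 2
      · have h5 : (t / N) * N + t % N = t := by omega
        rw [h5]
      · have h6 : p - (t / N) * m = p % m := by omega
        rw [h6]
    · rw [if_neg hc]
      unfold pvG
      have hne : p / m ≠ t / N := by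
        intro he
        have he' : (t / N) * m = (p / m) * m := by rw [he]
        exact hc ⟨by omega, by omega⟩
      have hc3 : N * (p / m) = (p / m) * N := Nat.mul_comm _ _
      have hkey : min N (t - (p / m) * N) = min N (t + 1 - (p / m) * N) := by
        rcases Nat.lt_or_ge (p / m) (t / N) with hlt | hge
        · have h3 : (p/m) * N + N ≤ (t/N) * N := by
            have h4 : (p/m + 1) * N ≤ (t/N) * N := Nat.mul_le_mul_right N (by omega)
            calc (p/m) * N + N = (p/m + 1) * N := by ring
              _ ≤ (t/N) * N := h4
          omega
        · have hgt : t / N < p / m := by omega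
          have h3 : (t/N) * N + N ≤ (p/m) * N := by
            have h4 : (t/N + 1) * N ≤ (p/m) * N := Nat.mul_le_mul_right N (by omega)
            calc (t/N) * N + N = (t/N + 1) * N := by ring
              _ ≤ (p/m) * N := h4
          omega
      rw [hkey]

theorem pvFlatMap_eq_map_range (N m : Nat) (F : Nat → Nat → String) :
    (List.range N).flatMap (fun r => (List.range m).map (F r))
      = (List.range (N * m)).map (fun p => F (p / m) (p % m)) := by
  induction N with
  | zero => simp
  | succ n ih =>
    rw [List.range_succ, List.flatMap_append, ih,
        show (n+1) * m = n*m + m from by ring, List.range_add, List.map_append]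
    congr 1
    simp only [List.flatMap_cons, List.flatMap_nil, List.append_nil, List.map_map]
    apply List.map_congr_left
    intro q hq
    have hqm : q < m := List.mem_range.1 hq
    have hm : 0 < m := by omega
    simp only [Function.comp_def]
    have h3 : n * m + q = q + m * n := by ring
    have h1 := Nat.add_mul_div_left q n hm
    have h2 := Nat.add_mul_mod_self_left q m n
    rw [h3, h1, h2, Nat.div_eq_of_lt hqm, Nat.mod_eq_of_lt hqm, Nat.zero_add]

theorem pvB_eq_canon (squares : List String) (size : Int) :
    recombineSquares_py_alt squares size = pvCanon squares size := by
  unfold recombineSquares_py_alt pvCanon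
  dsimp only
  have hNN := pvIsqrt_sq_le squares.length
  set N := pvIsqrt squares.length with hNdef
  by_cases hpos : 0 ≤ size + 1
  · obtain ⟨m, hm⟩ : ∃ m : Nat, size + 1 = (m : Int) := ⟨(size+1).toNat, by omega⟩
    have hcast1 : (N:Int) * (size+1) = ((N*m : Nat) : Int) := by rw [hm]; push_cast; ring
    have hcast2 : (N:Int) * (N:Int) = ((N*N : Nat) : Int) := by push_cast; ring
    rw [hcast1, hcast2, PySem.List.pyRange_zero_natCast, PySem.List.pyRange_zero_natCast,
        List.map_map, List.foldl_map]
    have hrows0 : (List.range (N*m)).map ((fun _ => "") ∘ (fun (k:Nat) => (k:Int)))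
        = (List.range (N*m)).map (fun _ => "") := rfl
    rw [hrows0]
    have hstep : ∀ (rows : List String) (t : Nat), t ∈ List.range (N*N) →
        (let lines := pvSplit (PySem.List.pyGetD squares (t:Int) "")
         let base : Int := (PySem.Int.floordiv (t:Int) (N:Int)) * (size+1)
         (PySem.List.pyRange 0 (size+1) 1).foldl (fun rows j =>
           PySem.List.pySetD rows (base + j)
             (PySem.List.pyGetD rows (base + j) "" ++ PySem.List.pyGetD lines j "")) rows)
        = pvStep squares N m rows t := by
      intro rows t htm
      have ht : t < N * N := List.mem_range.1 htm
      have hlt : t < squares.length := lt_of_lt_of_le ht hNN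
      dsimp only
      rw [hm, PySem.List.pyRange_zero_natCast, List.foldl_map]
      unfold pvStep
      apply PySem.List.foldl_congr_mem
      intro acc j _
      rw [PySem.Int.floordiv_natCast, PySem.List.pyGetD_natCast]
      have hidx : ((t/N : Nat) : Int) * ((m:Nat):Int) + (j:Int) = (((t/N)*m + j : Nat) : Int) := by
        push_cast; ring
      rw [hidx, PySem.List.pySetD_natCast, PySem.List.pyGetD_natCast, PySem.List.pyGetD_natCast]
      congr 1
      congr 1
      unfold pvLine
      rw [List.getD_eq_getElem squares _ hlt,
          List.getD_eq_getElem _ _ (show t < (squares.map (fun s => pvSplit s)).length by simpa using hlt),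
          List.getElem_map]
    rw [PySem.List.foldl_congr_mem _ _ (pvStep squares N m) _ hstep,
        pvScatter squares N m (N*N) le_rfl]
    rw [hm, Int.toNat_natCast,
        pvFlatMap_eq_map_range N m (fun r j =>
          PySem.Str.join "" ((List.range N).map (fun k =>
            ((squares.map (fun s => pvSplit s)).getD (r*N+k) []).getD j "")))]
    apply List.map_congr_left
    intro p hp
    have hpm : p < N * m := List.mem_range.1 hp
    have hcm : N * m = m * N := Nat.mul_comm _ _
    have hm0 : 0 < m := by
      by_contra h
      have hz : m = 0 := by omega
      rw [hz, Nat.mul_zero] at hpm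
      omega
    have hrN : p / m < N := Nat.div_lt_of_lt_mul (by omega)
    unfold pvG
    have hmin : min N (N*N - (p/m) * N) = N := by
      have h4 : (p/m + 1) * N ≤ N * N := Nat.mul_le_mul_right N (by omega)
      have h3 : (p/m) * N + N ≤ N * N := by
        calc (p/m) * N + N = (p/m + 1) * N := by ring
          _ ≤ N * N := h4
      omega
    rw [hmin]
    rfl
  · have h0 : (size+1).toNat = 0 := by omega
    have hr1 : PySem.List.pyRange 0 ((N:Int) * (size+1)) 1 = [] :=
      PySem.List.pyRange_one_eq_nil (by
        have : (N:Int) * (size+1) ≤ 0 :=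
          mul_nonpos_of_nonneg_of_nonpos (by positivity) (by omega)
        omega)
    have hr2 : PySem.List.pyRange 0 (size+1) 1 = [] :=
      PySem.List.pyRange_one_eq_nil (by omega)
    rw [hr1]
    simp only [hr2, List.foldl_nil, List.map_nil, List.foldl_fixed, h0, List.range_zero]
    induction (List.range N) with
    | nil => simp
    | cons a l ihl =>
      simp only [List.flatMap_cons, List.nil_append]
      exact ihl

-- ===== VERDICT (by name: the statement is the Claim_ definition above) =====
theorem recombineSquares_py_spec : Claim_equal_recombineSquares_py := by
  intro squares size _ _
  unfold Spec_recombineSquares_py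
  rw [pvA_eq_canon, pvB_eq_canon]
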